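-- pv_equiv track=rewrite | github.com/juyoung810/idecs-algorithm-study | junyoung/1972/1972_놀라운_문자열.py | sup
-- ===== SOURCE A (Python) =====
-- def sup(M):
--     m = len(M)
--     result = True
--     if m >1:
--         itv = [i for i in range(m-1)]
--         for i in itv:
--             s = set()
--             for j in range(m-1-i):
--                 _x = M[j]+M[j+1+i]
--                 s.add(_x)
--             if len(s) != m-1-i:
--                 result = False
--         return result
--     else:
--         return True
-- ===== SOURCE B (Python) =====
-- def sup(M):
--     m = len(M)
--     for j in range(m):
--         for k in range(j + 1, m):
--             if M[j] == M[k] and any(M[j + 1 + d] == M[k + 1 + d] for d in range(m - k - 1)):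
--                 return False
--     return True
-- ===== Notes on version B (the rewrite author's own statement) =====
-- stated objective: alternative
-- what changed: Instead of building a set of character-pair strings per gap and comparing each set's size to the pair count, B searches directly for a witness collision: two positions j<k with equal characters that also agree at some common offset d, returning False on the first collision found (no sets, no counting).
import Mathlib
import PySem

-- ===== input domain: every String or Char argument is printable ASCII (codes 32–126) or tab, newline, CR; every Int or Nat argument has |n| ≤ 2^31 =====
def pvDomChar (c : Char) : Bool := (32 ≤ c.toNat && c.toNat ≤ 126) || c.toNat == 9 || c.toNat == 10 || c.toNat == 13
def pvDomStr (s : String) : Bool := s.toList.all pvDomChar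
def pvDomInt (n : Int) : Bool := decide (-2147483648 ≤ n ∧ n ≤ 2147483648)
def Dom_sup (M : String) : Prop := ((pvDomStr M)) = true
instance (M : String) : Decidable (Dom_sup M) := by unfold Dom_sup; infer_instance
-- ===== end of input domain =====

-- B replaces A's per-gap set building and set-size comparisons by a direct search for a
-- colliding pair of positions j<k agreeing at some common offset (objective: alternative).

-- ===== PORT A =====
-- All indices j and j+1+i lie in [0, m), so Python's M[j] never raises here and
-- cs.getD is exact for the indexing; M[j]+M[j+1+i] is the two-char string.
def sup (M : String) : Bool :=
  let cs := M.toList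
  let m := cs.length
  if m > 1 then
    let itv := List.range (m - 1)
    itv.foldl (fun result i =>
      let s : PySem.Set String :=
        (List.range (m - 1 - i)).foldl (fun s j =>
          let x := String.ofList [cs.getD j ' ', cs.getD (j + 1 + i) ' ']
          PySem.Set.add s x) PySem.Set.empty
      if s.length ≠ m - 1 - i then false else result) true
  else
    true

-- ===== PORT B =====
-- B's early `return False` inside the nested for-loops is the List.any search;
-- all indices j, k, j+1+d, k+1+d lie in [0, m), so Python's M[_] is exact via getD.
def sup_alt (M : String) : Bool :=
  let cs := M.toList
  let m := cs.length
  !((List.range m).any (fun j =>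
      (List.range' (j + 1) (m - (j + 1))).any (fun k =>
        cs.getD j ' ' == cs.getD k ' ' &&
        (List.range (m - k - 1)).any (fun d =>
          cs.getD (j + 1 + d) ' ' == cs.getD (k + 1 + d) ' '))))

-- ===== PRECONDITION & SPEC =====
def Spec_sup (M : String) (out : Bool) : Prop := out = sup_alt M
instance (M : String) (out : Bool) : Decidable (Spec_sup M out) := by unfold Spec_sup; infer_instance

-- ===== CLAIM (what is proved, stated in full; the proofs are below) =====
def Claim_equal_sup : Prop := ∀ (M : String), Dom_sup M → Spec_sup M (sup M)

-- ===== LEMMAS AND PROOFS =====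

-- the inner loop of A builds set(map g l)
theorem foldl_add_eq_ofList_map {α β : Type} [BEq α] (l : List β) (g : β → α) :
    l.foldl (fun s j => PySem.Set.add s (g j)) PySem.Set.empty
      = PySem.Set.ofList (l.map g) := by
  rw [← PySem.Set.update_nil_left, PySem.Set.update_map_eq_foldl_add]
  rfl

-- len(set(xs)) = len(xs) iff xs has no duplicates
theorem length_ofList_eq_iff_nodup {α : Type} [BEq α] [LawfulBEq α] (xs : List α) :
    (PySem.Set.ofList xs).length = xs.length ↔ xs.Nodup := by
  induction xs using List.reverseRecOn with
  | nil => simp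
  | append_singleton xs x ih =>
    rw [PySem.Set.ofList_append_singleton, ← List.concat_eq_append, List.nodup_concat]
    by_cases hx : x ∈ PySem.Set.ofList xs
    · rw [PySem.Set.add_of_mem hx]
      have hle := PySem.Set.length_ofList_le (xs := xs)
      have hx' : x ∈ xs := (PySem.Set.mem_ofList xs x).1 hx
      simp only [List.length_concat]
      constructor
      · intro h; omega
      · intro h; exact absurd hx' h.1
    · rw [PySem.Set.add_of_not_mem hx]
      have hx' : x ∉ xs := fun h => hx ((PySem.Set.mem_ofList xs x).2 h)
      simp only [List.length_append, List.length_concat, List.length_singleton]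
      constructor
      · intro h; exact ⟨hx', ih.1 (by omega)⟩
      · intro h; rw [ih.2 h.2]

-- A's outer loop: the flag stays true iff no gap fails
theorem foldl_flag {β : Type} (l : List β) (p : β → Prop) [DecidablePred p] (b : Bool) :
    l.foldl (fun r i => if p i then false else r) b
      = (b && l.all fun i => !decide (p i)) := by
  induction l generalizing b with
  | nil => simp
  | cons x xs ih =>
    simp only [List.foldl_cons, List.all_cons, ih]
    by_cases h : p x <;> simp [h]

-- Nodup of a map over range ↔ no two indices give equal values
theorem nodup_map_range_iff {α : Type} (n : Nat) (f : Nat → α) :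
    ((List.range n).map f).Nodup ↔ ∀ j k, j < k → k < n → f j ≠ f k := by
  rw [List.Nodup, List.pairwise_map, List.pairwise_iff_getElem]
  simp only [List.length_range, List.getElem_range]
  constructor
  · intro h j k hjk hk; exact h j k (by omega) hk hjk
  · intro h j k _ hk hjk; exact h j k hjk hk

theorem two_char_string_eq {a b a' b' : Char} :
    String.ofList [a, b] = String.ofList [a', b'] ↔ a = a' ∧ b = b' := by
  constructor
  · intro h
    have := congrArg String.toList h
    simp at this
    exact this
  · rintro ⟨rfl, rfl⟩; rfl

theorem sup_spec_aux (cs : List Char) :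
    (sup (String.ofList cs)) = (sup_alt (String.ofList cs)) := by
  simp only [sup, sup_alt, String.toList_ofList]
  set m := cs.length with hm
  -- the common characterization: no collision (j,k,d)
  rw [Bool.eq_iff_iff]
  have hB : (!((List.range m).any (fun j =>
      (List.range' (j + 1) (m - (j + 1))).any (fun k =>
        cs.getD j ' ' == cs.getD k ' ' &&
        (List.range (m - k - 1)).any (fun d =>
          cs.getD (j + 1 + d) ' ' == cs.getD (k + 1 + d) ' '))))) = true
      ↔ ∀ j k d, j < k → k + 1 + d < m → cs.getD j ' ' = cs.getD k ' ' →
          cs.getD (j + 1 + d) ' ' ≠ cs.getD (k + 1 + d) ' ' := by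
    simp only [Bool.not_eq_eq_eq_not, Bool.not_true, List.any_eq_false, List.mem_range,
      List.mem_range'_1, List.any_eq_true, beq_iff_eq, Bool.and_eq_true,
      not_exists, not_and]
    constructor
    · intro h j k d hjk hkd hck hcd
      exact h j (by omega) k ⟨by omega, by omega⟩ hck d (by omega) hcd
    · intro h j _ k hk hck d hd
      exact h j k d (by omega) (by omega) hck
  rw [hB]
  by_cases hm1 : m > 1
  · simp only [hm1, if_true]
    have hinner : ∀ i : Nat,
        ((List.range (m - 1 - i)).foldl (fun s j =>
          PySem.Set.add s (String.ofList [cs.getD j ' ', cs.getD (j + 1 + i) ' '])) PySem.Set.empty)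
        = PySem.Set.ofList ((List.range (m - 1 - i)).map
            (fun j => String.ofList [cs.getD j ' ', cs.getD (j + 1 + i) ' '])) := fun i =>
      foldl_add_eq_ofList_map _ _
    rw [foldl_flag (p := fun i =>
      ((List.range (m - 1 - i)).foldl (fun s j =>
        PySem.Set.add s (String.ofList [cs.getD j ' ', cs.getD (j + 1 + i) ' '])) PySem.Set.empty).length ≠ m - 1 - i)]
    rw [Bool.true_and]
    simp only [List.all_eq_true, Bool.not_eq_eq_eq_not, Bool.not_true,
      decide_eq_false_iff_not, not_not, List.mem_range]
    constructor
    · -- A true → no collision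
      intro h j k d hjk hkd hck hcd
      have hlen := h d (by omega)
      rw [hinner d] at hlen
      have hnd : ((List.range (m - 1 - d)).map
          (fun j => String.ofList [cs.getD j ' ', cs.getD (j + 1 + d) ' '])).Nodup := by
        apply (length_ofList_eq_iff_nodup _).1
        simpa using hlen
      have := (nodup_map_range_iff (m - 1 - d) _).1 hnd j k hjk (by omega)
      exact this (two_char_string_eq.2 ⟨hck, hcd⟩)
    · -- no collision → A true
      intro h i hi
      rw [hinner i]
      have hnd : ((List.range (m - 1 - i)).map
          (fun j => String.ofList [cs.getD j ' ', cs.getD (j + 1 + i) ' '])).Nodup := by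
        apply (nodup_map_range_iff _ _).2
        intro j k hjk hk heq
        obtain ⟨hck, hcd⟩ := two_char_string_eq.1 heq
        exact h j k i hjk (by omega) hck hcd
      have := (length_ofList_eq_iff_nodup _).2 hnd
      simpa using this
  · -- m ≤ 1: A returns true; a collision needs k + 1 + d < m with j < k, impossible
    simp only [hm1, if_false, true_iff]
    intro j k d hjk hkd _
    omega

-- ===== VERDICT (by name: the statement is the Claim_ definition above) =====
theorem sup_spec : Claim_equal_sup := by
  intro M _
  unfold Spec_sup
  have h := sup_spec_aux M.toList
  rwa [String.ofList_toList] at h
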